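-- pv_equiv track=rewrite | github.com/mizuno-group/StrctualAlertFilter | src/data_handler.py | sfl_tokenize
-- ===== SOURCE A (Python) =====
-- def sfl_tokenize(smiles,token_list):
--     tokenized = []
--     for smile in smiles:
--         smile = smile.replace("Br","R").replace("Cl","L")
--         char = ""
--         tok = []
--         for s in smile:
--             char += s
--             if char in token_list:
--                 tok.append(char)
--                 char = ""
--         tokenized.append(tok)
--     return tokenized
-- ===== SOURCE B (Python) =====
-- def sfl_tokenize(smiles, token_list):
--     tokens = set(token_list)
--     out = []
--     for smile in smiles:
--         s = smile.replace("Br", "R").replace("Cl", "L")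
--         n = len(s)
--         tok = []
--         i = 0
--         while i < n:
--             # find the shortest prefix s[i:j] of the remaining string that is a token
--             j = i + 1
--             while j <= n and s[i:j] not in tokens:
--                 j += 1
--             if j > n:
--                 break  # no prefix of the rest matches: nothing more can be emitted
--             tok.append(s[i:j])
--             i = j
--         out.append(tok)
--     return out
-- ===== Notes on version B (the rewrite author's own statement) =====
-- stated objective: faster
-- what changed: Replaces A's char-by-char buffer accumulation with list membership at every character by a two-pointer scan over each string using a precomputed hash set, emitting at the shortest matching prefix and stopping early once no prefix of the remainder matches.
import Mathlib
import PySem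

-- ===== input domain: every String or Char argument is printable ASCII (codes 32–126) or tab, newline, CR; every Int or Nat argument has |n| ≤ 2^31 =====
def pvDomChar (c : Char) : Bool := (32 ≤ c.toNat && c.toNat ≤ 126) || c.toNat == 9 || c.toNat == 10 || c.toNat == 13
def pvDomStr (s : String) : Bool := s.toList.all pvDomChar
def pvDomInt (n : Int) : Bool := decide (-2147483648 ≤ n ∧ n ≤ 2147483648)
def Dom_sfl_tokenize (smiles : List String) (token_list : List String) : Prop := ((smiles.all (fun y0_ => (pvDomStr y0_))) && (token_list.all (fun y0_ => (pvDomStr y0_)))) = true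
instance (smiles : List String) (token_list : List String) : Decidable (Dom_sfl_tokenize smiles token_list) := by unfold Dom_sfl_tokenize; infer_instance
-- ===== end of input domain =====

-- B replaces A's buffer-accumulation (with a list-membership test at every character) by a
-- two-pointer shortest-prefix scan against a precomputed set, with early stop; return value only.

-- ===== PORT A =====
-- one step of A's inner 'for s in smile' loop: state = (char, tok)
def sflStepA (token_list : List String) (st : List Char × List String) (c : Char) : List Char × List String :=
  let char := st.1 ++ [c]
  if String.ofList char ∈ token_list then ([], st.2 ++ [String.ofList char]) else (char, st.2)

def sfl_tokenize (smiles : List String) (token_list : List String) : List (List String) :=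
  smiles.map (fun smile =>
    ((PySem.Str.replace (PySem.Str.replace smile "Br" "R") "Cl" "L").toList.foldl
      (sflStepA token_list) ([], [])).2)

-- ===== PORT B =====
-- inner 'while j <= n and s[i:j] not in tokens' loop: pre = s[i:j-1] built so far, rest = s[j-1:]
def findTok (tokens : PySem.Set String) : List Char → List Char → Option (List Char × List Char)
  | _, [] => none
  | pre, c :: rs =>
    let pre' := pre ++ [c]
    if String.ofList pre' ∈ tokens then some (pre', rs) else findTok tokens pre' rs

-- the port of B's outer while-loop needs this to terminate; cited in tokFrom's decreasing_by
theorem findTok_some_length {tokens : PySem.Set String} :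
    ∀ (s pre t rest : List Char), findTok tokens pre s = some (t, rest) → rest.length < s.length := by
  intro s
  induction s with
  | nil => intro pre t rest h; simp [findTok] at h
  | cons c rs ih =>
    intro pre t rest h
    simp only [findTok] at h
    split at h
    · cases h; simp
    · exact Nat.lt_trans (ih _ _ _ h) (by simp)

-- B's outer 'while i < n' loop, recursing on the remaining suffix
def tokFrom (tokens : PySem.Set String) (s : List Char) : List String :=
  match h : findTok tokens [] s with
  | none => []
  | some (t, rest) => String.ofList t :: tokFrom tokens rest
termination_by s.length
decreasing_by exact findTok_some_length s [] t rest h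

def sfl_tokenize_alt (smiles : List String) (token_list : List String) : List (List String) :=
  let tokens : PySem.Set String := PySem.Set.ofList token_list
  smiles.map (fun smile =>
    tokFrom tokens (PySem.Str.replace (PySem.Str.replace smile "Br" "R") "Cl" "L").toList)

-- ===== PRECONDITION & SPEC =====
def Spec_sfl_tokenize (smiles : List String) (token_list : List String) (out : List (List String)) : Prop := out = sfl_tokenize_alt smiles token_list
instance (smiles : List String) (token_list : List String) (out : List (List String)) : Decidable (Spec_sfl_tokenize smiles token_list out) := by unfold Spec_sfl_tokenize; infer_instance

-- ===== CLAIM (what is proved, stated in full; the proofs are below) =====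
def Claim_equal_sfl_tokenize : Prop := ∀ (smiles : List String) (token_list : List String), Dom_sfl_tokenize smiles token_list → Spec_sfl_tokenize smiles token_list (sfl_tokenize smiles token_list)

-- ===== LEMMAS AND PROOFS =====

-- B's inner state generalized: tokens emitted from suffix s with pending prefix pre
def tokFromPre (tokens : PySem.Set String) (pre s : List Char) : List String :=
  match findTok tokens pre s with
  | none => []
  | some (t, rest) => String.ofList t :: tokFrom tokens rest

theorem tokFrom_eq_pre (tokens : PySem.Set String) (s : List Char) :
    tokFrom tokens s = tokFromPre tokens [] s := by
  rw [tokFrom, tokFromPre]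
  rcases findTok tokens [] s with _ | ⟨t, rest⟩ <;> rfl

theorem tokFromPre_cons_mem {tokens : PySem.Set String} {pre : List Char} {c : Char} {rs : List Char}
    (h : String.ofList (pre ++ [c]) ∈ tokens) :
    tokFromPre tokens pre (c :: rs) = String.ofList (pre ++ [c]) :: tokFrom tokens rs := by
  simp only [tokFromPre, findTok, if_pos h]

theorem tokFromPre_cons_not_mem {tokens : PySem.Set String} {pre : List Char} {c : Char} {rs : List Char}
    (h : String.ofList (pre ++ [c]) ∉ tokens) :
    tokFromPre tokens pre (c :: rs) = tokFromPre tokens (pre ++ [c]) rs := by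
  simp only [tokFromPre, findTok, if_neg h]

-- the main invariant: A's fold from state (pre, acc) produces acc ++ B's tokens from (pre, s)
theorem foldA_eq_tokFromPre (token_list : List String) :
    ∀ (s pre : List Char) (acc : List String),
      (s.foldl (sflStepA token_list) (pre, acc)).2
        = acc ++ tokFromPre (PySem.Set.ofList token_list) pre s := by
  intro s
  induction s with
  | nil => intro pre acc; simp [tokFromPre, findTok]
  | cons c rs ih =>
    intro pre acc
    by_cases hmem : String.ofList (pre ++ [c]) ∈ token_list
    · have hset : String.ofList (pre ++ [c]) ∈ (PySem.Set.ofList token_list : PySem.Set String) :=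
        (PySem.Set.mem_ofList _ _).mpr hmem
      simp only [List.foldl_cons, sflStepA, if_pos hmem]
      rw [ih [] (acc ++ [String.ofList (pre ++ [c])]), tokFromPre_cons_mem hset, ← tokFrom_eq_pre]
      simp
    · have hset : String.ofList (pre ++ [c]) ∉ (PySem.Set.ofList token_list : PySem.Set String) :=
        fun h => hmem ((PySem.Set.mem_ofList _ _).mp h)
      simp only [List.foldl_cons, sflStepA, if_neg hmem]
      rw [ih (pre ++ [c]) acc, tokFromPre_cons_not_mem hset]

-- ===== VERDICT (by name: the statement is the Claim_ definition above) =====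
theorem sfl_tokenize_spec : Claim_equal_sfl_tokenize := by
  intro smiles token_list _
  unfold Spec_sfl_tokenize sfl_tokenize sfl_tokenize_alt
  refine List.map_congr_left (fun smile _ => ?_)
  rw [foldA_eq_tokFromPre token_list _ [] [], ← tokFrom_eq_pre]
  simp
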